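-- pv_equiv track=rewrite | github.com/KyoungnamMin/ProblemSolve | Programmers/조이스틱.py | solution
-- ===== SOURCE A (Python) =====
-- def solution(name):
--     name = list(name)
--     temp = ['A'] * len(name)
--     change_alpha = [min(ord(i)-ord('A'), ord('Z')-ord(i)+1) for i in name]
--
--     answer = 0
--     i = 0
--     while True:
--         # 글자 바꾸기
--         if name[i] != 'A':
--             answer += change_alpha[i]
--             temp[i] = name[i]
--         # 탈출 조건
--         if name == temp:
--             break
--         # 커서 이동
--         else:
--             for move in range(len(name)):
--                 # 오른쪽으로 이동이 빠르다면 오른쪽으로 이동하고 이동횟수 반영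
--                 if name[(i + move) % len(name)] != temp[(i + move) % len(name)]:
--                     i = (i + move) % len(name)
--                     answer += move
--                     break
--                 # 왼쪽으로 이동이 빠르다면 왼쪽으로 이동하고 이동횟수 반영
--                 elif name[(i + len(name) - move) % len(name)] != temp[(i + len(name) - move) % len(name)]:
--                     i = (i + len(name) - move) % len(name)
--                     answer += move
--                     break
--
--     return answer
-- ===== SOURCE B (Python) =====
-- import bisect
--
--
-- def solution(name):
--     n = len(name)
--     total = sum(min(ord(c) - ord('A'), ord('Z') - ord(c) + 1) for c in name)
--     rem = [j for j, c in enumerate(name) if c != 'A']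
--     i = 0
--     moves = 0
--     while rem:
--         m = len(rem)
--         pos = bisect.bisect_left(rem, i) % m
--         prev = (pos + m - 1) % m
--         succ, pred = rem[pos], rem[prev]
--         dr = (succ - i) % n
--         dl = (i - pred) % n
--         if dr <= dl:
--             moves += dr
--             rem.pop(pos)
--             i = succ
--         else:
--             moves += dl
--             rem.pop(prev)
--             i = pred
--     return total + moves
-- ===== Notes on version B (the rewrite author's own statement) =====
-- stated objective: faster
-- what changed: A rescans per step (an O(n) full list-equality test plus a circular scan over a temp array each iteration); B sums the vertical letter costs in one pass and simulates the cursor over a shrinking sorted list of the indices still needing a change, finding the nearest remaining index (right preferred on ties) by a single bisect per step.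
import Mathlib
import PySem

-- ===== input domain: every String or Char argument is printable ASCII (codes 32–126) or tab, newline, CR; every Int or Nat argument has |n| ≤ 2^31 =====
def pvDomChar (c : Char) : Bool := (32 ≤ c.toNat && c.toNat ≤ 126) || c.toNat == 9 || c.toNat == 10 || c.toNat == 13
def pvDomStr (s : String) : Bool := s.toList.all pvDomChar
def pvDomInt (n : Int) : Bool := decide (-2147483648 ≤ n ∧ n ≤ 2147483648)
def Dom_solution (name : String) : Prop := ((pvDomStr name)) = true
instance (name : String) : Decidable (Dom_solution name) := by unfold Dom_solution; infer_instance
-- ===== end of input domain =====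

-- B replaces A's repeated O(n) rescans (full list equality + circular scan per step) by a one-pass
-- vertical-cost sum plus a bisect-based nearest-remaining-index simulation; measurably faster.

-- shared letter-cost formula min(ord(c)-ord('A'), ord('Z')-ord(c)+1) (appears verbatim in both sources)
def chg (c : Char) : Int := min ((c.toNat : Int) - 65) (90 - (c.toNat : Int) + 1)

-- ===== PORT A =====
-- the inner `for move in range(len(name))` loop: returns the new cursor and the move count, none if no break
def scanGo (name temp : List Char) (i : Nat) : Nat → Nat → Option (Nat × Nat)
  | _, 0 => none
  | move, cnt+1 =>
    let n := name.length
    let f := (i + move) % n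
    let b := (i + n - move) % n
    if name.getD f ' ' ≠ temp.getD f ' ' then some (f, move)
    else if name.getD b ' ' ≠ temp.getD b ' ' then some (b, move)
    else scanGo name temp i (move+1) cnt

-- the `while True` loop; fuel 2*n+2 is an upper bound on the number of iterations (each iteration
-- after the first starts at a mismatch it then fixes), used only to make the recursion structural
def loopA (name : List Char) (change : List Int) : Nat → List Char → Nat → Int → Int
  | 0, _, _, acc => acc
  | fuel+1, temp, i, acc =>
    let c := name.getD i ' '
    let acc' := if c ≠ 'A' then acc + change.getD i 0 else acc
    let temp' := if c ≠ 'A' then temp.set i c else temp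
    if name = temp' then acc'
    else
      match scanGo name temp' i 0 name.length with
      | some (i', move) => loopA name change fuel temp' i' (acc' + (move : Int))
      | none => loopA name change fuel temp' i acc'

def solution (s : String) : Int :=
  let name := s.toList
  let change := name.map chg
  loopA name change (2 * name.length + 2) (List.replicate name.length 'A') 0 0

-- ===== PORT B =====
-- the `while rem:` loop of Source B: bisect for the cyclic successor/predecessor, right preferred on ties
def loopB (n : Nat) (rem : List Int) (i moves : Int) : Int :=
  if hrem : rem = [] then moves
  else
    let m := rem.length
    let pos := PySem.List.bisectLeft rem i % m
    let prev := (pos + m - 1) % m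
    let succ := rem.getD pos 0
    let pred := rem.getD prev 0
    let dr := PySem.Int.mod (succ - i) (n : Int)
    let dl := PySem.Int.mod (i - pred) (n : Int)
    if dr ≤ dl then loopB n (rem.eraseIdx pos) succ (moves + dr)
    else loopB n (rem.eraseIdx prev) pred (moves + dl)
termination_by rem.length
decreasing_by
  all_goals
    have hm : 0 < rem.length := List.length_pos_of_ne_nil hrem
    simp only [List.length_eraseIdx, if_pos (Nat.mod_lt _ hm)]
    omega

def solution_alt (s : String) : Int :=
  let name := s.toList
  let total := (name.map chg).sum
  let rem := ((PySem.List.enumerate name 0).filter (fun p => p.2 ≠ 'A')).map (·.1)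
  total + loopB name.length rem 0 0

-- ===== PRECONDITION & SPEC =====
-- Pre_ excludes only the empty string, on which A raises IndexError (name[0]).
def Pre_solution (name : String) : Prop := name ≠ ""
instance (name : String) : Decidable (Pre_solution name) := by unfold Pre_solution; infer_instance
def pvWitness_solution : String := "JAZ"

def Spec_solution (name : String) (out : Int) : Prop := out = solution_alt name
instance (name : String) (out : Int) : Decidable (Spec_solution name out) := by unfold Spec_solution; infer_instance

-- ===== CLAIM (what is proved, stated in full; the proofs are below) =====
def Claim_equal_solution : Prop := ∀ (name : String), Dom_solution name → Pre_solution name → Spec_solution name (solution name)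

-- ===== LEMMAS AND PROOFS =====

-- the A-side `temp` array determined by the list R of still-unfixed positions
def tempOf (name : List Char) (R : List Nat) : List Char :=
  (List.range name.length).map (fun j => if j ∈ R then 'A' else name.getD j ' ')

-- cyclic forward / backward distance from i to x (both < n)
def fdist (n i x : Nat) : Nat := (x + n - i) % n
def bdist (n i x : Nat) : Nat := (i + n - x) % n

lemma modTwo (a n : Nat) (h : a < 2 * n) : a % n = if a < n then a else a - n := by
  split
  · exact Nat.mod_eq_of_lt ‹_›
  · rw [Nat.mod_eq_sub_mod (by omega)]
    exact Nat.mod_eq_of_lt (by omega)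

lemma castmod (s i n : Nat) (hs : s < n) (hi : i < n) :
    PySem.Int.mod ((s : Int) - (i : Int)) (n : Int) = (((s + n - i) % n : Nat) : Int) := by
  rw [PySem.Int.mod_eq_emod_of_pos (by omega)]
  have h1 : (s : Int) - (i : Int) = ((s + n - i : Nat) : Int) - (n : Int) := by omega
  rw [h1, Int.sub_emod_right, ← Int.natCast_emod]

lemma getD_tempOf (name : List Char) (R : List Nat) (p : Nat) (hp : p < name.length) :
    (tempOf name R).getD p ' ' = if p ∈ R then 'A' else name.getD p ' ' := by
  unfold tempOf
  rw [List.getD_eq_getElem _ _ (by simpa using hp)]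
  simp [hp]

lemma mism_iff (name : List Char) (R : List Nat) (p : Nat) (hp : p < name.length)
    (hR : ∀ j ∈ R, j < name.length ∧ name.getD j ' ' ≠ 'A') :
    (name.getD p ' ' ≠ (tempOf name R).getD p ' ') ↔ p ∈ R := by
  rw [getD_tempOf name R p hp]
  by_cases hm : p ∈ R
  · rw [if_pos hm]
    simp only [hm, iff_true]
    exact (hR p hm).2
  · rw [if_neg hm]
    simp [hm]

lemma tempOf_nil (name : List Char) : tempOf name [] = name := by
  apply List.ext_getElem (by simp [tempOf])
  intro j h1 h2
  simp [tempOf, List.getD, List.getElem?_eq_getElem h2]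

lemma eq_tempOf_iff (name : List Char) (R : List Nat)
    (hR : ∀ j ∈ R, j < name.length ∧ name.getD j ' ' ≠ 'A') :
    name = tempOf name R ↔ R = [] := by
  constructor
  · intro h
    by_contra hne
    obtain ⟨j, hj⟩ := List.exists_mem_of_ne_nil R hne
    have h2 : name.getD j ' ' = (tempOf name R).getD j ' ' := by rw [← h]
    rw [getD_tempOf name R j (hR j hj).1, if_pos hj] at h2
    exact (hR j hj).2 h2
  · intro h; rw [h, tempOf_nil]

lemma set_tempOf (name : List Char) (R : List Nat) (i : Nat) (hmem : i ∈ R) (hnd : R.Nodup)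
    (hi : i < name.length) :
    (tempOf name R).set i (name.getD i ' ') = tempOf name (R.erase i) := by
  apply List.ext_getElem (by simp [tempOf])
  intro k h1 h2
  have hk : k < name.length := by simpa [tempOf] using h2
  rw [List.getElem_set]
  by_cases hik : i = k
  · subst hik
    simp [tempOf, List.Nodup.not_mem_erase hnd]
  · simp only [if_neg hik]
    simp [tempOf, hk, List.Nodup.mem_erase_iff hnd, Ne.symm hik]

lemma eraseIdx_eq_erase_getElem (R : List Nat) :
    ∀ (k : Nat) (hk : k < R.length), R.Nodup → R.eraseIdx k = R.erase R[k] := by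
  induction R with
  | nil => intro k hk; simp at hk
  | cons a t ih =>
    intro k hk hnd
    cases k with
    | zero => simp
    | succ k =>
      have hkt : k < t.length := by simpa using hk
      have hne : a ≠ t[k] := by
        intro h
        exact (List.nodup_cons.mp hnd).1 (h ▸ List.getElem_mem hkt)
      simp only [List.eraseIdx_cons_succ, List.getElem_cons_succ]
      rw [List.erase_cons_tail (by simpa using hne), ih k hkt (List.nodup_cons.mp hnd).2]

lemma map_eraseIdx_int (R : List Nat) (k : Nat) :
    (R.eraseIdx k).map Int.ofNat = (R.map Int.ofNat).eraseIdx k :=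
  Eq.symm (List.eraseIdx_map Int.ofNat R k)

-- scanGo finds the first move (≥ mv) that hits a mismatch, forward preferred
lemma scanGo_found (name temp : List Char) (i d : Nat) :
    ∀ (cnt mv : Nat), mv ≤ d → d < mv + cnt →
    (∀ m2, mv ≤ m2 → m2 < d →
      ¬ (name.getD ((i + m2) % name.length) ' ' ≠ temp.getD ((i + m2) % name.length) ' ') ∧
      ¬ (name.getD ((i + name.length - m2) % name.length) ' ' ≠ temp.getD ((i + name.length - m2) % name.length) ' ')) →
    ((name.getD ((i + d) % name.length) ' ' ≠ temp.getD ((i + d) % name.length) ' ') ∨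
     (name.getD ((i + name.length - d) % name.length) ' ' ≠ temp.getD ((i + name.length - d) % name.length) ' ')) →
    scanGo name temp i mv cnt =
      some (if name.getD ((i + d) % name.length) ' ' ≠ temp.getD ((i + d) % name.length) ' '
            then ((i + d) % name.length, d) else ((i + name.length - d) % name.length, d)) := by
  intro cnt
  induction cnt with
  | zero => intro mv h1 h2 _ _; omega
  | succ cnt ih =>
    intro mv h1 h2 hno hhit
    by_cases hmv : mv = d
    · subst hmv
      by_cases hF : name.getD ((i + mv) % name.length) ' ' ≠ temp.getD ((i + mv) % name.length) ' '
      · simp only [scanGo, if_pos hF]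
      · have hB := hhit.resolve_left hF
        simp only [scanGo, if_neg hF, if_pos hB]
    · have hlt : mv < d := by omega
      have hn := hno mv le_rfl hlt
      simp only [scanGo, if_neg hn.1, if_neg hn.2]
      exact ih (mv + 1) (by omega) (by omega) (fun m2 ha hb => hno m2 (by omega) hb) hhit

lemma loopB_nil (n : Nat) (i moves : Int) : loopB n [] i moves = moves := by
  rw [loopB]; simp

lemma loopB_acc_aux (n : Nat) : ∀ (L : Nat) (rem : List Int), rem.length ≤ L → ∀ (i moves : Int),
    loopB n rem i moves = moves + loopB n rem i 0 := by
  intro L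
  induction L with
  | zero =>
    intro rem h i moves
    have hnil : rem = [] := List.eq_nil_of_length_eq_zero (by omega)
    subst hnil; rw [loopB_nil, loopB_nil]; ring
  | succ L ih =>
    intro rem h i moves
    by_cases hrem : rem = []
    · subst hrem; rw [loopB_nil, loopB_nil]; ring
    · have hpos : 0 < rem.length := List.length_pos_of_ne_nil hrem
      have hlen : ∀ k, k < rem.length → (rem.eraseIdx k).length ≤ L := by
        intro k hk; rw [List.length_eraseIdx, if_pos hk]; omega
      rw [loopB]; conv_rhs => rw [loopB]
      simp only [dif_neg hrem]
      split
      · have hl := hlen _ (Nat.mod_lt (PySem.List.bisectLeft rem i) hpos)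
        conv_rhs => rw [ih _ hl]
        rw [ih _ hl]; ring
      · have hl := hlen _ (Nat.mod_lt (PySem.List.bisectLeft rem i % rem.length + rem.length - 1) hpos)
        conv_rhs => rw [ih _ hl]
        rw [ih _ hl]; ring

lemma loopB_acc (n : Nat) (rem : List Int) (i moves : Int) :
    loopB n rem i moves = moves + loopB n rem i 0 :=
  loopB_acc_aux n rem.length rem le_rfl i moves

lemma fdist_eq (n i y : Nat) (hy : y < n) (hi : i < n) :
    fdist n i y = if y < i then y + n - i else y - i := by
  unfold fdist
  rw [modTwo (y + n - i) n (by omega)]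
  split_ifs <;> omega

lemma bdist_eq (n i y : Nat) (hy : y < n) (hi : i < n) :
    bdist n i y = if i < y then i + n - y else i - y := by
  unfold bdist
  rw [modTwo (i + n - y) n (by omega)]
  split_ifs <;> omega

lemma fdist_lt (n i y : Nat) (hn : 0 < n) : fdist n i y < n := Nat.mod_lt _ hn

lemma bdist_lt (n i y : Nat) (hn : 0 < n) : bdist n i y < n := Nat.mod_lt _ hn

lemma fwd_fdist (n i mv : Nat) (hmv : mv < n) (hi : i < n) : fdist n i ((i + mv) % n) = mv := by
  unfold fdist
  rw [modTwo (i + mv) n (by omega)]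
  split_ifs with h
  · rw [modTwo _ _ (by omega)]; split_ifs <;> omega
  · rw [modTwo _ _ (by omega)]; split_ifs <;> omega

lemma fdist_fwd (n i s : Nat) (hs : s < n) (hi : i < n) : (i + fdist n i s) % n = s := by
  unfold fdist
  rw [modTwo (s + n - i) n (by omega)]
  split_ifs with h
  · rw [modTwo _ _ (by omega)]; split_ifs <;> omega
  · rw [modTwo _ _ (by omega)]; split_ifs <;> omega

lemma bwd_bdist (n i mv : Nat) (hmv : mv < n) (hi : i < n) :
    bdist n i ((i + n - mv) % n) = mv := by
  unfold bdist
  rw [modTwo (i + n - mv) n (by omega)]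
  split_ifs with h
  · rw [modTwo _ _ (by omega)]; split_ifs <;> omega
  · rw [modTwo _ _ (by omega)]; split_ifs <;> omega

lemma bdist_bwd (n i p : Nat) (hp : p < n) (hi : i < n) : (i + n - bdist n i p) % n = p := by
  unfold bdist
  rw [modTwo (i + n - p) n (by omega)]
  split_ifs with h
  · rw [modTwo _ _ (by omega)]; split_ifs <;> omega
  · rw [modTwo _ _ (by omega)]; split_ifs <;> omega

lemma bisect_pack (R : List Nat) (i : Nat) (hsort : R.Pairwise (· < ·)) :
    PySem.List.bisectLeft (R.map Int.ofNat) (i : Int) ≤ R.length ∧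
    (∀ k (hk : k < R.length), k < PySem.List.bisectLeft (R.map Int.ofNat) (i : Int) → R[k] < i) ∧
    (∀ k (hk : k < R.length), PySem.List.bisectLeft (R.map Int.ofNat) (i : Int) ≤ k → i ≤ R[k]) := by
  have hple : (R.map Int.ofNat).Pairwise (· ≤ ·) :=
    List.pairwise_map.mpr (hsort.imp (fun h => Int.ofNat_le.mpr (Nat.le_of_lt h)))
  obtain ⟨h1, h2, h3⟩ := PySem.List.bisectLeft_spec (R.map Int.ofNat) (i : Int) hple
  refine ⟨by simpa using h1, ?_, ?_⟩
  · intro k hk hlt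
    have := h2 k (by simpa using hk) hlt
    simpa using this
  · intro k hk hle
    have := h3 k (by simpa using hk) hle
    simpa using this

-- R[pos] is the unique minimiser of the forward cyclic distance, given its characterisation
lemma fwd_min' (n i s : Nat) (R : List Nat) (hn : 0 < n) (hRn : ∀ x ∈ R, x < n) (hi : i < n)
    (hiR : i ∉ R) (hs : s ∈ R)
    (hchar : (i ≤ s ∧ ∀ x ∈ R, i ≤ x → s ≤ x) ∨ ((∀ x ∈ R, x < i) ∧ ∀ x ∈ R, s ≤ x)) :
    ∀ x ∈ R, x ≠ s → fdist n i s < fdist n i x := by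
  intro x hx hne
  have hxn := hRn x hx
  have hsn := hRn s hs
  have hxi : x ≠ i := fun h => hiR (h ▸ hx)
  have hsi : s ≠ i := fun h => hiR (h ▸ hs)
  rw [fdist_eq n i s hsn hi, fdist_eq n i x hxn hi]
  rcases hchar with ⟨h1, h2⟩ | ⟨h1, h2⟩
  · by_cases hix : i ≤ x
    · have := h2 x hx hix
      split_ifs <;> omega
    · split_ifs <;> omega
  · have := h1 x hx
    have := h2 x hx
    split_ifs <;> omega

lemma bwd_min' (n i p : Nat) (R : List Nat) (hn : 0 < n) (hRn : ∀ x ∈ R, x < n) (hi : i < n)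
    (hiR : i ∉ R) (hp : p ∈ R)
    (hchar : (p < i ∧ ∀ x ∈ R, x < i → x ≤ p) ∨ ((∀ x ∈ R, i < x) ∧ ∀ x ∈ R, x ≤ p)) :
    ∀ x ∈ R, x ≠ p → bdist n i p < bdist n i x := by
  intro x hx hne
  have hxn := hRn x hx
  have hpn := hRn p hp
  have hxi : x ≠ i := fun h => hiR (h ▸ hx)
  have hpi : p ≠ i := fun h => hiR (h ▸ hp)
  rw [bdist_eq n i p hpn hi, bdist_eq n i x hxn hi]
  rcases hchar with ⟨h1, h2⟩ | ⟨h1, h2⟩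
  · by_cases hix : x < i
    · have := h2 x hx hix
      split_ifs <;> omega
    · split_ifs <;> omega
  · have := h1 x hx
    have := h2 x hx
    split_ifs <;> omega

-- one step of loopB from the state (R.map cast, i) with i ∈ R: picks i itself at cost 0
lemma select_self (name : List Char) (R : List Nat) (i : Nat)
    (hn : 0 < name.length) (hsort : R.Pairwise (· < ·))
    (hR : ∀ j ∈ R, j < name.length) (hi : i < name.length) (hmem : i ∈ R) :
    loopB name.length (R.map Int.ofNat) (i : Int) 0 =
    loopB name.length ((R.erase i).map Int.ofNat) (i : Int) 0 := by
  have hnd : R.Nodup := List.Pairwise.imp (fun h => Nat.ne_of_lt h) hsort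
  obtain ⟨t, ht, hRt⟩ := List.getElem_of_mem hmem
  obtain ⟨hc1, hc2, hc3⟩ := bisect_pack R i hsort
  set c := PySem.List.bisectLeft (R.map Int.ofNat) (i : Int) with hc
  have hct : c ≤ t := by
    by_contra h
    push_neg at h
    have := hc2 t ht h
    omega
  have hcm : c < R.length := Nat.lt_of_le_of_lt hct ht
  have hRc : R[c] = i := by
    rcases Nat.lt_or_ge c t with h | h
    · have hlt := List.pairwise_iff_getElem.mp hsort c t hcm ht h
      have := hc3 c hcm le_rfl
      omega
    · have hct' : c = t := le_antisymm hct h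
      subst hct'
      exact hRt
  have hremne : R.map Int.ofNat ≠ [] := by
    simp only [ne_eq, List.map_eq_nil_iff]
    exact List.ne_nil_of_mem hmem
  rw [loopB]
  simp only [dif_neg hremne, List.length_map, ← hc]
  rw [Nat.mod_eq_of_lt hcm]
  have hgd : (R.map Int.ofNat).getD c 0 = (i : Int) := by
    rw [List.getD_eq_getElem _ _ (by simpa using hcm), List.getElem_map, hRc]
    rfl
  rw [hgd]
  have hdr : PySem.Int.mod ((i : Int) - (i : Int)) (name.length : Int) = 0 := by
    rw [sub_self, PySem.Int.mod_eq_emod_of_pos (by exact_mod_cast hn), Int.zero_emod]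
  rw [hdr]
  rw [if_pos (PySem.Int.mod_nonneg _ (show (0:Int) < (name.length : Int) by exact_mod_cast hn))]
  rw [← map_eraseIdx_int, eraseIdx_eq_erase_getElem R c hcm hnd, hRc]
  norm_num

-- one step of loopB from (R.map cast, i) with i ∉ R, R ≠ []: picks the unique nearest j (right
-- preferred), which is also what A's scan returns
lemma select (name : List Char) (R : List Nat) (i : Nat)
    (hn : 0 < name.length) (hsort : R.Pairwise (· < ·))
    (hR : ∀ j ∈ R, j < name.length ∧ name.getD j ' ' ≠ 'A')
    (hi : i < name.length) (hiR : i ∉ R) (hne : R ≠ []) :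
    ∃ (j d : Nat), j ∈ R ∧
      scanGo name (tempOf name R) i 0 name.length = some (j, d) ∧
      loopB name.length (R.map Int.ofNat) (i : Int) 0 =
        (d : Int) + loopB name.length ((R.erase j).map Int.ofNat) (j : Int) 0 := by
  have hnd : R.Nodup := List.Pairwise.imp (fun h => Nat.ne_of_lt h) hsort
  have hRn : ∀ x ∈ R, x < name.length := fun x hx => (hR x hx).1
  obtain ⟨hc1, hc2, hc3⟩ := bisect_pack R i hsort
  set c := PySem.List.bisectLeft (R.map Int.ofNat) (i : Int) with hc
  have hm : 0 < R.length := List.length_pos_of_ne_nil hne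
  have hposm : c % R.length < R.length := Nat.mod_lt _ hm
  have hprevm : (c % R.length + R.length - 1) % R.length < R.length := Nat.mod_lt _ hm
  have hsmem : R[c % R.length] ∈ R := List.getElem_mem hposm
  have hpmem : R[(c % R.length + R.length - 1) % R.length] ∈ R := List.getElem_mem hprevm
  have hmono : ∀ (k k' : Nat) (hk : k < R.length) (hk' : k' < R.length), k < k' → R[k] < R[k'] :=
    fun k k' hk hk' hlt => List.pairwise_iff_getElem.mp hsort k k' hk hk' hlt
  have hidx : ∀ x ∈ R, ∃ (k : Nat) (hk : k < R.length), R[k] = x := fun x hx => List.getElem_of_mem hx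
  have hcharF : (i ≤ R[c % R.length] ∧ ∀ x ∈ R, i ≤ x → R[c % R.length] ≤ x) ∨
      ((∀ x ∈ R, x < i) ∧ ∀ x ∈ R, R[c % R.length] ≤ x) := by
    by_cases hcm : c < R.length
    · left
      have hpc : c % R.length = c := Nat.mod_eq_of_lt hcm
      refine ⟨by simp only [hpc]; exact hc3 c hcm le_rfl, ?_⟩
      intro x hx hix
      obtain ⟨k, hk, hkx⟩ := hidx x hx
      have hck : c ≤ k := by
        by_contra hlt
        have := hc2 k hk (by omega)
        omega
      simp only [hpc]
      rcases Nat.lt_or_ge c k with h | h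
      · have := hmono c k hcm hk h; omega
      · have : c = k := by omega
        subst this; omega
    · right
      have hpc : c % R.length = 0 := by
        have hceq : c = R.length := by omega
        rw [hceq, Nat.mod_self]
      constructor
      · intro x hx
        obtain ⟨k, hk, hkx⟩ := hidx x hx
        have := hc2 k hk (by omega)
        omega
      · intro x hx
        obtain ⟨k, hk, hkx⟩ := hidx x hx
        simp only [hpc]
        rcases Nat.eq_zero_or_pos k with h | h
        · subst h; omega
        · have := hmono 0 k (by omega) hk (by omega); omega
  have hcharB : (R[(c % R.length + R.length - 1) % R.length] < i ∧
        ∀ x ∈ R, x < i → x ≤ R[(c % R.length + R.length - 1) % R.length]) ∨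
      ((∀ x ∈ R, i < x) ∧ ∀ x ∈ R, x ≤ R[(c % R.length + R.length - 1) % R.length]) := by
    by_cases hc0 : c = 0
    · right
      have hpc : (c % R.length + R.length - 1) % R.length = R.length - 1 := by
        rw [hc0]
        simp only [Nat.zero_mod, Nat.zero_add]
        exact Nat.mod_eq_of_lt (by omega)
      constructor
      · intro x hx
        obtain ⟨k, hk, hkx⟩ := hidx x hx
        have hix := hc3 k hk (by omega)
        have hxi : x ≠ i := fun h => hiR (h ▸ hx)
        omega
      · intro x hx
        obtain ⟨k, hk, hkx⟩ := hidx x hx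
        simp only [hpc]
        rcases Nat.lt_or_ge k (R.length - 1) with h | h
        · have := hmono k (R.length - 1) hk (by omega) h; omega
        · have : k = R.length - 1 := by omega
          subst this; omega
    · left
      have hpc : (c % R.length + R.length - 1) % R.length = c - 1 := by
        by_cases hcm : c < R.length
        · rw [Nat.mod_eq_of_lt hcm, modTwo _ _ (by omega)]
          split_ifs <;> omega
        · have hceq : c = R.length := by omega
          rw [hceq, Nat.mod_self]
          simp only [Nat.zero_add]
          exact Nat.mod_eq_of_lt (by omega)
      simp only [hpc]
      constructor
      · exact hc2 (c - 1) (by omega) (by omega)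
      · intro x hx hxi
        obtain ⟨k, hk, hkx⟩ := hidx x hx
        have hkc : k < c := by
          by_contra hge
          have := hc3 k hk (by omega)
          omega
        rcases Nat.lt_or_ge k (c - 1) with h | h
        · have := hmono k (c - 1) hk (by omega) h; omega
        · have : k = c - 1 := by omega
          subst this; omega
  have hFmin := fwd_min' name.length i R[c % R.length] R hn hRn hi hiR hsmem hcharF
  have hBmin := bwd_min' name.length i R[(c % R.length + R.length - 1) % R.length] R hn hRn hi hiR hpmem hcharB
  have hsn := hRn _ hsmem
  have hpn := hRn _ hpmem
  have hmism : ∀ p, p < name.length → ((name.getD p ' ' ≠ (tempOf name R).getD p ' ') ↔ p ∈ R) :=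
    fun p hp => mism_iff name R p hp hR
  have hdS := fdist_lt name.length i R[c % R.length] hn
  have hdP := bdist_lt name.length i R[(c % R.length + R.length - 1) % R.length] hn
  have hnohit : ∀ m2, m2 < fdist name.length i R[c % R.length] →
      m2 < bdist name.length i R[(c % R.length + R.length - 1) % R.length] →
      ¬ (name.getD ((i + m2) % name.length) ' ' ≠ (tempOf name R).getD ((i + m2) % name.length) ' ') ∧
      ¬ (name.getD ((i + name.length - m2) % name.length) ' ' ≠ (tempOf name R).getD ((i + name.length - m2) % name.length) ' ') := by
    intro m2 hmS hmP
    constructor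
    · intro hhit
      rw [hmism _ (Nat.mod_lt _ hn)] at hhit
      have hf := fwd_fdist name.length i m2 (by omega) hi
      rcases eq_or_ne ((i + m2) % name.length) R[c % R.length] with he | he
      · rw [he] at hf; omega
      · have := hFmin _ hhit he; omega
    · intro hhit
      rw [hmism _ (Nat.mod_lt _ hn)] at hhit
      have hb := bwd_bdist name.length i m2 (by omega) hi
      rcases eq_or_ne ((i + name.length - m2) % name.length) R[(c % R.length + R.length - 1) % R.length] with he | he
      · rw [he] at hb; omega
      · have := hBmin _ hhit he; omega
  have hremne : R.map Int.ofNat ≠ [] := by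
    simp only [ne_eq, List.map_eq_nil_iff]
    exact hne
  have hgds : (R.map Int.ofNat).getD (c % R.length) 0 = (R[c % R.length] : Int) := by
    rw [List.getD_eq_getElem _ _ (by simpa using hposm), List.getElem_map]
    rfl
  have hgdp : (R.map Int.ofNat).getD ((c % R.length + R.length - 1) % R.length) 0
      = (R[(c % R.length + R.length - 1) % R.length] : Int) := by
    rw [List.getD_eq_getElem _ _ (by simpa using hprevm), List.getElem_map]
    rfl
  have hdrS : PySem.Int.mod ((R[c % R.length] : Int) - (i : Int)) (name.length : Int)
      = (fdist name.length i R[c % R.length] : Int) := castmod _ i name.length hsn hi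
  have hdlP : PySem.Int.mod ((i : Int) - (R[(c % R.length + R.length - 1) % R.length] : Int)) (name.length : Int)
      = (bdist name.length i R[(c % R.length + R.length - 1) % R.length] : Int) :=
    castmod i _ name.length hi hpn
  by_cases hbranch : fdist name.length i R[c % R.length] ≤ bdist name.length i R[(c % R.length + R.length - 1) % R.length]
  · refine ⟨R[c % R.length], fdist name.length i R[c % R.length], hsmem, ?_, ?_⟩
    · have hfwd : (i + fdist name.length i R[c % R.length]) % name.length = R[c % R.length] :=
        fdist_fwd name.length i _ hsn hi
      have hhitF : name.getD R[c % R.length] ' ' ≠ (tempOf name R).getD R[c % R.length] ' ' :=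
        (hmism _ hsn).mpr hsmem
      have hscan := scanGo_found name (tempOf name R) i (fdist name.length i R[c % R.length])
        name.length 0 (by omega) (by omega)
        (fun m2 _ hb => hnohit m2 hb (by omega)) (Or.inl (by rw [hfwd]; exact hhitF))
      rw [hfwd] at hscan
      rw [if_pos hhitF] at hscan
      exact hscan
    · rw [loopB]
      simp only [dif_neg hremne, List.length_map, ← hc]
      rw [hgds, hgdp, hdrS, hdlP]
      rw [if_pos (by exact_mod_cast hbranch)]
      rw [loopB_acc]
      rw [← map_eraseIdx_int, eraseIdx_eq_erase_getElem R _ hposm hnd]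
      norm_num
  · push_neg at hbranch
    refine ⟨R[(c % R.length + R.length - 1) % R.length],
      bdist name.length i R[(c % R.length + R.length - 1) % R.length], hpmem, ?_, ?_⟩
    · have hbwd : (i + name.length - bdist name.length i R[(c % R.length + R.length - 1) % R.length]) % name.length
          = R[(c % R.length + R.length - 1) % R.length] := bdist_bwd name.length i _ hpn hi
      have hhitB : name.getD R[(c % R.length + R.length - 1) % R.length] ' '
          ≠ (tempOf name R).getD R[(c % R.length + R.length - 1) % R.length] ' ' :=
        (hmism _ hpn).mpr hpmem
      have hnofwd : ¬ (name.getD ((i + bdist name.length i R[(c % R.length + R.length - 1) % R.length]) % name.length) ' '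
          ≠ (tempOf name R).getD ((i + bdist name.length i R[(c % R.length + R.length - 1) % R.length]) % name.length) ' ') := by
        intro hhit
        rw [hmism _ (Nat.mod_lt _ hn)] at hhit
        have hf := fwd_fdist name.length i _ (by omega) hi
        rcases eq_or_ne ((i + bdist name.length i R[(c % R.length + R.length - 1) % R.length]) % name.length) R[c % R.length] with he | he
        · rw [he] at hf; omega
        · have := hFmin _ hhit he; omega
      have hscan := scanGo_found name (tempOf name R) i
        (bdist name.length i R[(c % R.length + R.length - 1) % R.length])
        name.length 0 (by omega) (by omega)
        (fun m2 _ hb => hnohit m2 (by omega) hb) (Or.inr (by rw [hbwd]; exact hhitB))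
      rw [if_neg hnofwd] at hscan
      rw [hbwd] at hscan
      exact hscan
    · rw [loopB]
      simp only [dif_neg hremne, List.length_map, ← hc]
      rw [hgds, hgdp, hdrS, hdlP]
      rw [if_neg (by push_neg; exact_mod_cast hbranch)]
      rw [loopB_acc]
      rw [← map_eraseIdx_int, eraseIdx_eq_erase_getElem R _ hprevm hnd]
      norm_num

lemma sum_map_filter_zero (l : List Nat) (p : Nat → Bool) (f : Nat → Int)
    (h : ∀ x ∈ l, ¬ p x → f x = 0) :
    ((l.filter p).map f).sum = (l.map f).sum := by
  induction l with
  | nil => rfl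
  | cons a t ih =>
    by_cases hp : p a
    · simp [hp, ih (fun x hx => h x (List.mem_cons_of_mem a hx))]
    · simp [hp, ih (fun x hx => h x (List.mem_cons_of_mem a hx)), h a (List.mem_cons_self) hp]

-- the main bridge: A's loop from the state described by R equals the stated closed combination of B's loop
lemma bridge (name : List Char) (fuel : Nat) :
    ∀ (R : List Nat) (i : Nat) (acc : Int),
    0 < name.length →
    R.Pairwise (· < ·) →
    (∀ j ∈ R, j < name.length ∧ name.getD j ' ' ≠ 'A') →
    i < name.length →
    (i ∈ R ∨ name.getD i ' ' = 'A') →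
    2 * R.length + (if i ∈ R then 1 else 2) ≤ fuel →
    loopA name (name.map chg) fuel (tempOf name R) i acc
      = acc + ((R.map (fun j => chg (name.getD j ' '))).sum)
        + loopB name.length (R.map Int.ofNat) (i : Int) 0 := by
  induction fuel with
  | zero =>
    intro R i acc _ _ _ _ _ hfuel
    exfalso
    split_ifs at hfuel <;> omega
  | succ fuel ih =>
    intro R i acc hn hsort hR hi hiR hfuel
    have hnd : R.Nodup := List.Pairwise.imp (fun h => Nat.ne_of_lt h) hsort
    have hRn : ∀ x ∈ R, x < name.length := fun x hx => (hR x hx).1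
    have hchg : (name.map chg).getD i 0 = chg (name.getD i ' ') := by
      rw [List.getD_eq_getElem _ _ (by simpa using hi), List.getElem_map,
        List.getD_eq_getElem _ _ hi]
    simp only [loopA]
    by_cases hmem : i ∈ R
    · have hciA : name.getD i ' ' ≠ 'A' := (hR i hmem).2
      rw [if_pos hciA, if_pos hciA, hchg, set_tempOf name R i hmem hnd hi]
      simp only [if_pos hmem] at hfuel
      have hlenR : 0 < R.length := List.length_pos_of_ne_nil (List.ne_nil_of_mem hmem)
      have hperm : R.Perm (i :: (R.erase i)) := List.perm_cons_erase hmem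
      have hsum : (R.map (fun j => chg (name.getD j ' '))).sum
          = chg (name.getD i ' ') + ((R.erase i).map (fun j => chg (name.getD j ' '))).sum := by
        rw [List.Perm.sum_eq (hperm.map _)]
        simp
      by_cases hempty : R.erase i = []
      · rw [hempty, tempOf_nil, if_pos rfl]
        rw [hsum]
        rw [select_self name R i hn hsort hRn hi hmem, hempty]
        simp [loopB_nil, hempty]
      · have hR' : ∀ j ∈ R.erase i, j < name.length ∧ name.getD j ' ' ≠ 'A' :=
          fun j hj => hR j (List.mem_of_mem_erase hj)
        have hsort' : (R.erase i).Pairwise (· < ·) := List.Pairwise.sublist List.erase_sublist hsort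
        have hiR' : i ∉ R.erase i := List.Nodup.not_mem_erase hnd
        have hne2 : name ≠ tempOf name (R.erase i) :=
          fun heq => hempty ((eq_tempOf_iff name _ hR').mp heq)
        rw [if_neg hne2]
        obtain ⟨j, d, hjmem, hscan, hloopB⟩ := select name (R.erase i) i hn hsort' hR' hi hiR' hempty
        simp only [hscan]
        have hjR : j ∈ R := List.mem_of_mem_erase hjmem
        have hjn : j < name.length := (hR j hjR).1
        have hfuel' : 2 * (R.erase i).length + (if j ∈ R.erase i then 1 else 2) ≤ fuel := by
          rw [if_pos hjmem, List.length_erase_of_mem hmem]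
          omega
        rw [ih (R.erase i) j (acc + chg (name.getD i ' ') + (d : Int)) hn hsort' hR' hjn
          (Or.inl hjmem) hfuel']
        rw [select_self name (R.erase i) j hn hsort' (fun x hx => (hR' x hx).1) hjn hjmem]
        rw [select_self name R i hn hsort hRn hi hmem, hloopB, hsum]
        ring
    · have hciA : name.getD i ' ' = 'A' := hiR.resolve_left hmem
      have hcond : ¬ (name.getD i ' ' ≠ 'A') := fun h => h hciA
      rw [if_neg hcond, if_neg hcond]
      simp only [if_neg hmem] at hfuel
      by_cases hempty : R = []
      · subst hempty
        rw [tempOf_nil, if_pos rfl]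
        simp [loopB_nil]
      · have hne2 : name ≠ tempOf name R := fun heq => hempty ((eq_tempOf_iff name R hR).mp heq)
        rw [if_neg hne2]
        obtain ⟨j, d, hjmem, hscan, hloopB⟩ := select name R i hn hsort hR hi hmem hempty
        simp only [hscan]
        have hjn : j < name.length := (hR j hjmem).1
        have hfuel' : 2 * R.length + (if j ∈ R then 1 else 2) ≤ fuel := by
          rw [if_pos hjmem]
          omega
        rw [ih R j (acc + (d : Int)) hn hsort hR hjn (Or.inl hjmem) hfuel']
        rw [select_self name R j hn hsort hRn hjn hjmem]
        rw [hloopB]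
        ring

lemma replicate_tempOf (name : List Char) :
    List.replicate name.length 'A'
      = tempOf name ((List.range name.length).filter (fun j => name.getD j ' ' ≠ 'A')) := by
  apply List.ext_getElem (by simp [tempOf])
  intro k h1 h2
  have hk : k < name.length := by simpa using h1
  have h3 : (tempOf name ((List.range name.length).filter (fun j => name.getD j ' ' ≠ 'A')))[k]'h2
      = if k ∈ (List.range name.length).filter (fun j => name.getD j ' ' ≠ 'A') then 'A'
        else name.getD k ' ' := by
    rw [← List.getD_eq_getElem _ ' ' h2]
    exact getD_tempOf name _ k hk
  rw [List.getElem_replicate, h3]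
  by_cases hA : name.getD k ' ' = 'A'
  · split_ifs with h
    · rfl
    · exact hA.symm
  · rw [if_pos (by simp [List.mem_filter, List.mem_range]; exact ⟨hk, hA⟩)]

lemma map_range_getD (name : List Char) (f : Char → Int) :
    (List.range name.length).map (fun j => f (name.getD j ' ')) = name.map f := by
  apply List.ext_getElem (by simp)
  intro k h1 h2
  have hk : k < name.length := by simpa using h1
  simp [List.getD, List.getElem?_eq_getElem hk]

lemma rem_eq (name : List Char) :
    ((PySem.List.enumerate name 0).filter (fun p => p.2 ≠ 'A')).map (·.1)
      = ((List.range name.length).filter (fun j => name.getD j ' ' ≠ 'A')).map Int.ofNat := by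
  rw [PySem.List.enumerate_eq_map_pyRange name ' ', PySem.List.len_eq, PySem.List.pyRange_zero_nat]
  rw [List.filter_map, List.map_map, List.filter_map, List.map_map]
  rw [List.filter_congr (q := fun j => decide (name.getD j ' ' ≠ 'A'))
    (fun x hx => by simp [Function.comp])]
  apply List.map_congr_left
  intro x hx
  simp

-- ===== VERDICT (by name: the statement is the Claim_ definition above) =====
theorem solution_spec : Claim_equal_solution := by
  unfold Claim_equal_solution Spec_solution Pre_solution
  intro name _ hpre
  have hn : 0 < name.toList.length := by
    rcases Nat.eq_zero_or_pos name.toList.length with h | h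
    · exact absurd (String.toList_eq_nil_iff.mp (List.eq_nil_of_length_eq_zero h)) hpre
    · exact h
  show solution name = solution_alt name
  simp only [solution, solution_alt]
  have hR0 : ∀ j ∈ (List.range name.toList.length).filter (fun j => name.toList.getD j ' ' ≠ 'A'),
      j < name.toList.length ∧ name.toList.getD j ' ' ≠ 'A' := by
    intro j hj
    simp only [List.mem_filter, List.mem_range, decide_not] at hj
    exact ⟨hj.1, by simpa using hj.2⟩
  have hsort0 : ((List.range name.toList.length).filter
      (fun j => name.toList.getD j ' ' ≠ 'A')).Pairwise (· < ·) :=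
    List.Pairwise.sublist List.filter_sublist List.pairwise_lt_range
  have hstart : 0 ∈ (List.range name.toList.length).filter (fun j => name.toList.getD j ' ' ≠ 'A')
      ∨ name.toList.getD 0 ' ' = 'A' := by
    by_cases hA : name.toList.getD 0 ' ' = 'A'
    · exact Or.inr hA
    · exact Or.inl (by simp [List.mem_filter, List.mem_range]; exact ⟨hn, hA⟩)
  have hfuel : 2 * ((List.range name.toList.length).filter
        (fun j => name.toList.getD j ' ' ≠ 'A')).length
      + (if 0 ∈ (List.range name.toList.length).filter (fun j => name.toList.getD j ' ' ≠ 'A')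
         then 1 else 2) ≤ 2 * name.toList.length + 2 := by
    have := List.length_filter_le (fun j => decide (name.toList.getD j ' ' ≠ 'A')) (List.range name.toList.length)
    simp only [List.length_range] at this
    split_ifs <;> omega
  rw [replicate_tempOf]
  rw [bridge name.toList (2 * name.toList.length + 2)
    ((List.range name.toList.length).filter (fun j => name.toList.getD j ' ' ≠ 'A')) 0 0
    hn hsort0 hR0 hn hstart hfuel]
  rw [rem_eq]
  have hsum : (((List.range name.toList.length).filter (fun j => name.toList.getD j ' ' ≠ 'A')).map
      (fun j => chg (name.toList.getD j ' '))).sum = (name.toList.map chg).sum := by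
    rw [sum_map_filter_zero _ _ _ (by
      intro x hx hnx
      have : name.toList.getD x ' ' = 'A' := by simpa using hnx
      rw [this]
      decide)]
    rw [map_range_getD]
  rw [hsum]
  norm_num
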